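-- pv_equiv track=rewrite | github.com/GGonnerman/QRCode | encoding.py | to_alphanumeric
-- ===== SOURCE A (Python) =====
-- def to_alphanumeric(data: str) -> tuple[int, int]:
--     try:
--         base45_data = [lookup_alphanumeric_value(c) for c in data]
--     except ValueError:
--         raise ValueError(f"Attempted to encode {data} with alphanumeric mode, but not all characters are compatible")
--
--     bit_data = 0
--     for i in range(0, len(base45_data), 2):
--         current_data = base45_data[i]
--         if i + 1 < len(base45_data):
--             current_data *= 45
--             current_data += base45_data[i + 1]
--             bit_data = bit_data << 11
--             bit_data = bit_data | current_data
--         else: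
--             bit_data = bit_data << 6
--             bit_data = bit_data | current_data
--     data_binary_length = 11 * (len(data) // 2) + 6 * (len(data) % 2)
--
--     return bit_data, data_binary_length
--
-- def lookup_alphanumeric_value(character: str) -> int:
--     return list("0123456789ABCDEFGHIJKLMNOPQRSTUVWXYZ $%*+-./:").index(character)
-- ===== SOURCE B (Python) =====
-- ALPHANUMERIC = "0123456789ABCDEFGHIJKLMNOPQRSTUVWXYZ $%*+-./:"
--
-- def to_alphanumeric(data: str) -> tuple[int, int]:
--     try:
--         vals = [ALPHANUMERIC.index(c) for c in data]
--     except ValueError: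
--         raise ValueError(f"Attempted to encode {data} with alphanumeric mode, but not all characters are compatible")
--     it = iter(vals)
--     pieces = [format(a * 45 + b, '011b') for a, b in zip(it, it)]
--     if len(data) % 2:
--         pieces.append(format(vals[-1], '06b'))
--     s = ''.join(pieces)
--     bit_data = int(s, 2) if s else 0
--     data_binary_length = 11 * (len(data) // 2) + 6 * (len(data) % 2)
--     return bit_data, data_binary_length
-- ===== Notes on version B (the rewrite author's own statement) =====
-- stated objective: idiomatic
-- what changed: Replaces A's shift/or integer accumulator with the idiomatic string pipeline: format each pair (and odd trailing char) as a zero-padded binary string piece, join the pieces, and parse once with int(s, 2) (guarding the empty string).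
import Mathlib
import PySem

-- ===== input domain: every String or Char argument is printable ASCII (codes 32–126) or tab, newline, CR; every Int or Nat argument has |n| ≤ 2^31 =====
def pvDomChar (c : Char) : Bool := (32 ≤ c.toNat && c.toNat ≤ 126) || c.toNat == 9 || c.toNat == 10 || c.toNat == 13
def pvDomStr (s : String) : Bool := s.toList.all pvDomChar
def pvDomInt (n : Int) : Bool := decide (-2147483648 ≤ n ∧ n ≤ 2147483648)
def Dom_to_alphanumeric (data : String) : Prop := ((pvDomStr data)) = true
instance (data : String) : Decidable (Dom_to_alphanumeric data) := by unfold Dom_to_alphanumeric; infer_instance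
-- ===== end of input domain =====

-- B replaces A's shift/or integer accumulator by the idiomatic build: format each
-- pair (and odd trailing char) as a zero-padded binary string, join, and parse once
-- with int(s, 2) (objective: idiomatic; not faster).

-- ===== PORT A =====
-- list("0123456789ABCDEFGHIJKLMNOPQRSTUVWXYZ $%*+-./:")
def pvAlpha : List Char := "0123456789ABCDEFGHIJKLMNOPQRSTUVWXYZ $%*+-./:".toList

-- lookup_alphanumeric_value: .index raises ValueError = none (excluded by Pre_)
def lookup_alphanumeric_value (c : Char) : Option Nat := PySem.List.index? pvAlpha c

-- the 'for i in range(0, len(base45_data), 2)' loop; bit_data stays a nonnegative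
-- Python int, so it is carried as a Nat ( <<< and ||| are Python's << and | here)
def pvALoop (vals : List Nat) (i : Nat) (acc : Nat) : Nat :=
  if i < vals.length then
    let current := vals.getD i 0
    if i + 1 < vals.length then
      pvALoop vals (i + 2) ((acc <<< 11) ||| (current * 45 + vals.getD (i + 1) 0))
    else
      pvALoop vals (i + 2) ((acc <<< 6) ||| current)
  else acc
termination_by vals.length - i
decreasing_by all_goals omega

def to_alphanumeric (data : String) : Int × Int :=
  let base45_data := data.toList.map (fun c => (lookup_alphanumeric_value c).getD 0)
  let bit_data := pvALoop base45_data 0 0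
  ((bit_data : Int),
   ((11 * (data.toList.length / 2) + 6 * (data.toList.length % 2) : Nat) : Int))

-- ===== PORT B =====
-- format(v, '0{k}b'): exactly k binary digits; exact for v < 2^k (all values B formats are)
def pvBinPad : Nat → Nat → List Char
  | 0, _ => []
  | k + 1, v => pvBinPad k (v / 2) ++ [if v % 2 = 1 then '1' else '0']

-- [format(a*45+b, '011b') for a, b in zip(it, it)]
def pvPairPieces : List Nat → List (List Char)
  | a :: b :: r => pvBinPad 11 (a * 45 + b) :: pvPairPieces r
  | _ => []

-- int(s, 2), hand-ported: exact for nonempty strings of '0'/'1' digits (no sign,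
-- whitespace or underscore), which is all B ever parses
def pvParseBin (acc : Nat) : List Char → Nat
  | [] => acc
  | c :: r => pvParseBin (acc * 2 + (if c = '1' then 1 else 0)) r

def to_alphanumeric_alt (data : String) : Int × Int :=
  let vals := data.toList.map (fun c => (lookup_alphanumeric_value c).getD 0)
  let pieces := pvPairPieces vals
  let pieces := if data.toList.length % 2 = 1
                then pieces ++ [pvBinPad 6 (vals.getLastD 0)] else pieces
  let s := pieces.flatten
  let bit_data := if s = [] then 0 else pvParseBin 0 s
  ((bit_data : Int),
   ((11 * (data.toList.length / 2) + 6 * (data.toList.length % 2) : Nat) : Int))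

-- ===== PRECONDITION & SPEC =====
-- A raises ValueError when some character of data is not in the 45-char alphanumeric
-- table; exactly those inputs are excluded (B raises there too).
def Pre_to_alphanumeric (data : String) : Prop := (data.toList.all (fun c => decide (c ∈ pvAlpha))) = true
instance (data : String) : Decidable (Pre_to_alphanumeric data) := by unfold Pre_to_alphanumeric; infer_instance
def pvWitness_to_alphanumeric : String := "HELLO WORLD"
def Spec_to_alphanumeric (data : String) (out : Int × Int) : Prop := out = to_alphanumeric_alt data
instance (data : String) (out : Int × Int) : Decidable (Spec_to_alphanumeric data out) := by unfold Spec_to_alphanumeric; infer_instance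

-- ===== CLAIM (what is proved, stated in full; the proofs are below) =====
def Claim_equal_to_alphanumeric : Prop := ∀ (data : String), Dom_to_alphanumeric data → Pre_to_alphanumeric data → Spec_to_alphanumeric data (to_alphanumeric data)

-- ===== LEMMAS AND PROOFS =====

-- shift-then-or is plain arithmetic when the or-ed value fits in the shifted-in zeros
theorem pv_shiftOr (acc v k : Nat) (h : v < 2 ^ k) :
    (acc <<< k) ||| v = acc * 2 ^ k + v := by
  rw [Nat.shiftLeft_eq, Nat.mul_comm, ← Nat.two_pow_add_eq_or_of_lt h, Nat.mul_comm]

theorem pv_parseBin_append (acc : Nat) (s t : List Char) :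
    pvParseBin acc (s ++ t) = pvParseBin (pvParseBin acc s) t := by
  induction s generalizing acc with
  | nil => rfl
  | cons c r ih => simp [pvParseBin, ih]

theorem pv_parseBin_binPad (k v acc : Nat) (h : v < 2 ^ k) :
    pvParseBin acc (pvBinPad k v) = acc * 2 ^ k + v := by
  induction k generalizing acc v with
  | zero => simp [pvBinPad, pvParseBin]; omega
  | succ k ih =>
    have hp : 2 ^ (k + 1) = 2 ^ k * 2 := Nat.pow_succ 2 k
    have hv : v / 2 < 2 ^ k := by omega
    simp only [pvBinPad, pv_parseBin_append, ih _ _ hv, pvParseBin]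
    have hm : acc * 2 ^ (k + 1) = acc * 2 ^ k * 2 := by rw [hp]; ring
    rcases Nat.mod_two_eq_zero_or_one v with h2 | h2 <;> simp [h2] <;> omega

-- the chunked form of A's index loop
def pvChunk (acc : Nat) : List Nat → Nat
  | [] => acc
  | [a] => (acc <<< 6) ||| a
  | a :: b :: r => pvChunk ((acc <<< 11) ||| (a * 45 + b)) r

theorem pv_aLoop_eq_chunk (vals : List Nat) (i acc : Nat) :
    pvALoop vals i acc = pvChunk acc (vals.drop i) := by
  induction i, acc using pvALoop.induct vals with
  | case1 i acc hi current hi1 ih =>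
    have hc : current = vals.getD i 0 := rfl
    rw [hc] at ih
    conv_lhs => rw [pvALoop]
    simp only [if_pos hi, if_pos hi1]
    rw [ih, List.drop_eq_getElem_cons hi, List.drop_eq_getElem_cons hi1]
    simp [pvChunk, List.getElem?_eq_getElem hi, List.getElem?_eq_getElem hi1]
  | case2 i acc hi current hi1 ih =>
    have hc : current = vals.getD i 0 := rfl
    rw [hc] at ih
    conv_lhs => rw [pvALoop]
    simp only [if_pos hi, if_neg hi1]
    have h2 : vals.drop (i + 2) = [] := List.drop_eq_nil_of_le (by omega)
    have h1 : vals.drop (i + 1) = [] := List.drop_eq_nil_of_le (by omega)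
    rw [ih, h2, List.drop_eq_getElem_cons hi, h1]
    simp [pvChunk, List.getElem?_eq_getElem hi]
  | case3 i acc hi =>
    conv_lhs => rw [pvALoop]
    simp [if_neg hi, List.drop_eq_nil_of_le (by omega : vals.length ≤ i), pvChunk]

-- the binary string B builds for a value list, as one chunk recursion
def pvBinStr : List Nat → List Char
  | [] => []
  | [a] => pvBinPad 6 a
  | a :: b :: r => pvBinPad 11 (a * 45 + b) ++ pvBinStr r

theorem pv_pieces_eq_binStr (vals : List Nat) :
    (if vals.length % 2 = 1 then pvPairPieces vals ++ [pvBinPad 6 (vals.getLastD 0)]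
     else pvPairPieces vals).flatten = pvBinStr vals := by
  induction vals using pvBinStr.induct with
  | case1 => simp [pvPairPieces, pvBinStr]
  | case2 a => simp [pvPairPieces, pvBinStr]
  | case3 a b r ih =>
    have hmod : (a :: b :: r).length % 2 = r.length % 2 := by simp; omega
    rw [hmod]
    by_cases hodd : r.length % 2 = 1
    · obtain ⟨x, r', rfl⟩ : ∃ x r', r = x :: r' := by
        cases r with
        | nil => simp at hodd
        | cons x r' => exact ⟨x, r', rfl⟩
      rw [if_pos hodd] at ih ⊢
      have hlast : (a :: b :: x :: r').getLastD 0 = (x :: r').getLastD 0 := by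
        simp
      rw [hlast]
      simp only [pvPairPieces, pvBinStr, List.cons_append, List.flatten_cons, ← ih]
    · rw [if_neg hodd] at ih ⊢
      simp only [pvPairPieces, pvBinStr, List.flatten_cons, ← ih]

theorem pv_chunk_eq_parse (vals : List Nat) (acc : Nat)
    (hb : ∀ v ∈ vals, v < 45) :
    pvChunk acc vals = pvParseBin acc (pvBinStr vals) := by
  induction vals using pvBinStr.induct generalizing acc with
  | case1 => rfl
  | case2 a =>
    have ha : a < 45 := hb a (by simp)
    rw [pvChunk, pvBinStr, pv_parseBin_binPad 6 a acc (by omega),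
      pv_shiftOr acc a 6 (by omega)]
  | case3 a b r ih =>
    have ha : a < 45 := hb a (by simp)
    have hab : b < 45 := hb b (by simp)
    have hr : ∀ v ∈ r, v < 45 := fun v hv => hb v (by simp [hv])
    rw [pvChunk, pvBinStr, pv_parseBin_append, ih _ hr,
      pv_parseBin_binPad 11 (a * 45 + b) acc (by omega),
      pv_shiftOr acc (a * 45 + b) 11 (by omega)]

theorem pv_binPad_length (k v : Nat) : (pvBinPad k v).length = k := by
  induction k generalizing v with
  | zero => rfl
  | succ k ih => simp [pvBinPad, ih]

theorem pv_binStr_ne_nil (vals : List Nat) (h : vals ≠ []) : pvBinStr vals ≠ [] := by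
  intro hnil
  have hl := congrArg List.length hnil
  match vals, h with
  | [a], _ => simp [pvBinStr, pv_binPad_length] at hl
  | a :: b :: r, _ => simp [pvBinStr, pv_binPad_length] at hl

-- ===== VERDICT (by name: the statement is the Claim_ definition above) =====
theorem to_alphanumeric_spec : Claim_equal_to_alphanumeric := by
  intro data _ hpre0
  have hpre : ∀ c ∈ data.toList, c ∈ pvAlpha := by
    intro c hc
    have := List.all_eq_true.mp hpre0 c hc
    simpa using this
  unfold Spec_to_alphanumeric to_alphanumeric to_alphanumeric_alt
  set vals := data.toList.map (fun c => (lookup_alphanumeric_value c).getD 0) with hv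
  have hlen : data.toList.length = vals.length := by simp [hv]
  have hb : ∀ v ∈ vals, v < 45 := by
    intro v hvmem
    rw [hv] at hvmem
    obtain ⟨c, hc, rfl⟩ := List.mem_map.mp hvmem
    have hcmem : c ∈ pvAlpha := hpre c hc
    obtain ⟨k, hk⟩ := Option.isSome_iff_exists.mp
      ((PySem.List.index?_isSome_iff pvAlpha c).mpr hcmem)
    obtain ⟨hlt, -⟩ := PySem.List.getElem_of_index?_eq_some hk
    have h45 : pvAlpha.length = 45 := by decide
    simp only [lookup_alphanumeric_value, hk, Option.getD_some]
    omega
  have hbit : pvALoop vals 0 0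
      = (if pvBinStr vals = [] then (0 : Nat) else pvParseBin 0 (pvBinStr vals)) := by
    rw [pv_aLoop_eq_chunk, List.drop_zero, pv_chunk_eq_parse vals 0 hb]
    by_cases h : vals = []
    · simp [h, pvBinStr, pvParseBin]
    · rw [if_neg (pv_binStr_ne_nil vals h)]
  simp only [hlen, pv_pieces_eq_binStr vals, ← hbit]
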